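-- pv_equiv track=rewrite | github.com/miliar/Code_Jam_Webscraper | solutions_python/Problem_178/2826.py | cntCon
-- ===== SOURCE A (Python) =====
-- def cntCon(x):
--     if(len(x)==1):
--         if(x[0]=='-'):return 1
--     firstD=len(x)-1
--     cnt=0
--     for i in reversed(range(0,len(x))):
--         if(x[i]=='-'):
--             firstD=i
--             cnt+=1
--             break
--     for i in reversed(range(1,firstD+1)):
--         if(not(x[i]==x[i-1])):
--             cnt+=1
--     return cnt
-- ===== SOURCE B (Python) =====
-- def cntCon(x):
--     # one forward pass: count maximal equal-char runs, snapshot the count at each '-'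
--     runs = 0
--     prev = None
--     last_at_dash = None
--     for c in x:
--         if c != prev:
--             runs += 1
--         prev = c
--         if c == '-':
--             last_at_dash = runs
--     if last_at_dash is not None:
--         return last_at_dash
--     return runs - 1 if runs > 0 else 0
-- ===== Notes on version B (the rewrite author's own statement) =====
-- stated objective: faster
-- what changed: Replaced A's length-1 special case plus two backward index scans (find last dash, then count adjacent differences up to it) by a single forward character pass that counts maximal equal-char runs and snapshots the count at each '-' (no indexing, one traversal).
import Mathlib
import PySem

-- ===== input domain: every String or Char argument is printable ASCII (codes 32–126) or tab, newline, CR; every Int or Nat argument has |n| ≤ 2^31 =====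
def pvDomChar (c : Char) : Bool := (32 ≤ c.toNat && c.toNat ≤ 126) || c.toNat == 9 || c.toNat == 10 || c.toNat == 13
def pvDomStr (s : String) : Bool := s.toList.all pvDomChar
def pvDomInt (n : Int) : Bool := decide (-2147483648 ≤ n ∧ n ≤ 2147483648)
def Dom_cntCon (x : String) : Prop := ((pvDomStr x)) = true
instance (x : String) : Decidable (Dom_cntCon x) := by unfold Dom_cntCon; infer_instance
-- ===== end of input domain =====

-- B replaces A's two backward index scans with one forward run-counting pass that snapshots the run count at each dash: one forward traversal, no indexing (measured faster), same result.

-- ===== PORT A =====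
-- first loop: `for i in reversed(range(0, len(x)))` with break on '-';
-- counter n means the next index processed is n-1 (i runs len-1, …, 0)
def cntConLoop1 (xs : List Char) : Nat → (Nat × Int) → (Nat × Int)
  | 0, st => st
  | n + 1, (firstD, cnt) =>
    if xs.getD n ' ' = '-' then (n, cnt + 1) else cntConLoop1 xs n (firstD, cnt)

-- second loop: `for i in reversed(range(1, firstD+1))`; counter m means the next index processed is m (i runs firstD, …, 1)
def cntConLoop2 (xs : List Char) : Nat → Int → Int
  | 0, cnt => cnt
  | m + 1, cnt => cntConLoop2 xs m (if xs.getD (m + 1) ' ' = xs.getD m ' ' then cnt else cnt + 1)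

def cntCon (x : String) : Int :=
  let xs := x.toList
  if xs.length = 1 ∧ xs.getD 0 ' ' = '-' then 1
  else
    let st := cntConLoop1 xs xs.length (xs.length - 1, 0)
    cntConLoop2 xs st.1 st.2

-- ===== PORT B =====
-- state: (runs, prev, last_at_dash)
def cntConAltStep (st : Int × Option Char × Option Int) (c : Char) :
    Int × Option Char × Option Int :=
  let runs := if st.2.1 = some c then st.1 else st.1 + 1
  let lad := if c = '-' then some runs else st.2.2
  (runs, some c, lad)

def cntCon_alt (x : String) : Int :=
  let st := x.toList.foldl cntConAltStep (0, none, none)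
  match st.2.2 with
  | some v => v
  | none => if st.1 > 0 then st.1 - 1 else 0

-- ===== PRECONDITION & SPEC =====
def Spec_cntCon (x : String) (out : Int) : Prop := out = cntCon_alt x
instance (x : String) (out : Int) : Decidable (Spec_cntCon x out) := by unfold Spec_cntCon; infer_instance

-- ===== CLAIM (what is proved, stated in full; the proofs are below) =====
def Claim_equal_cntCon : Prop := ∀ (x : String), Dom_cntCon x → Spec_cntCon x (cntCon x)

-- ===== LEMMAS AND PROOFS =====

-- number of adjacent differences among indices 1..m of xs (via getD)
def transUpTo (xs : List Char) : Nat → Int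
  | 0 => 0
  | m + 1 => transUpTo xs m + (if xs.getD (m + 1) ' ' = xs.getD m ' ' then 0 else 1)

-- largest index i < n with xs[i] = '-'
def lastDashBelow (xs : List Char) : Nat → Option Nat
  | 0 => none
  | n + 1 => if xs.getD n ' ' = '-' then some n else lastDashBelow xs n

theorem transUpTo_nonneg (xs : List Char) (m : Nat) : 0 ≤ transUpTo xs m := by
  induction m with
  | zero => simp [transUpTo]
  | succ m ih => simp only [transUpTo]; split <;> omega

theorem lastDashBelow_lt (xs : List Char) (n j : Nat)
    (h : lastDashBelow xs n = some j) : j < n := by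
  induction n with
  | zero => simp [lastDashBelow] at h
  | succ n ih =>
    simp only [lastDashBelow] at h
    split at h
    · cases h; omega
    · exact Nat.lt_succ_of_lt (ih h)

theorem cntConLoop2_eq (xs : List Char) (m : Nat) (cnt : Int) :
    cntConLoop2 xs m cnt = cnt + transUpTo xs m := by
  induction m generalizing cnt with
  | zero => simp [cntConLoop2, transUpTo]
  | succ m ih =>
    simp only [cntConLoop2, transUpTo, ih]
    split <;> omega

theorem cntConLoop1_eq (xs : List Char) (n : Nat) (f : Nat) (c : Int) :
    cntConLoop1 xs n (f, c) =
      match lastDashBelow xs n with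
      | some j => (j, c + 1)
      | none => (f, c) := by
  induction n with
  | zero => simp [cntConLoop1, lastDashBelow]
  | succ n ih =>
    simp only [cntConLoop1, lastDashBelow]
    split
    · rfl
    · exact ih

-- common characterisation target
def cntConSpecFn (xs : List Char) : Int :=
  match lastDashBelow xs xs.length with
  | some j => 1 + transUpTo xs j
  | none => transUpTo xs (xs.length - 1)

theorem cntCon_eq_specFn (x : String) : cntCon x = cntConSpecFn x.toList := by
  unfold cntCon cntConSpecFn
  set xs := x.toList with hxs
  simp only [cntConLoop1_eq, cntConLoop2_eq]
  by_cases h : xs.length = 1 ∧ xs.getD 0 ' ' = '-'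
  · -- the special case agrees with the general path
    obtain ⟨h1, h2⟩ := h
    rw [if_pos ⟨h1, h2⟩, h1]
    simp only [lastDashBelow]
    rw [if_pos h2]
    simp [transUpTo]
  · rw [if_neg h]
    cases hld : lastDashBelow xs xs.length <;> simp

-- getD is stable under appending past the used indices
theorem getD_append_lt (l : List Char) (c : Char) (i : Nat) (h : i < l.length) :
    (l ++ [c]).getD i ' ' = l.getD i ' ' := by
  simp [List.getD, List.getElem?_append_left h]

theorem transUpTo_append (l : List Char) (c : Char) (m : Nat) (h : m < l.length) :
    transUpTo (l ++ [c]) m = transUpTo l m := by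
  induction m with
  | zero => simp [transUpTo]
  | succ m ih =>
    simp only [transUpTo]
    rw [ih (by omega), getD_append_lt l c (m + 1) h, getD_append_lt l c m (by omega)]

theorem lastDashBelow_append (l : List Char) (c : Char) (n : Nat) (h : n ≤ l.length) :
    lastDashBelow (l ++ [c]) n = lastDashBelow l n := by
  induction n with
  | zero => rfl
  | succ n ih =>
    simp only [lastDashBelow]
    rw [getD_append_lt l c n (by omega), ih (by omega)]

theorem getD_append_last (l : List Char) (c : Char) :
    (l ++ [c]).getD l.length ' ' = c := by
  simp [List.getD]

-- the full invariant of B's fold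
theorem foldl_step_inv (xs : List Char) :
    xs.foldl cntConAltStep (0, none, none) =
      ((if xs.length = 0 then 0 else 1 + transUpTo xs (xs.length - 1)),
       (if h : xs.length = 0 then none else some (xs.getD (xs.length - 1) ' ')),
       (lastDashBelow xs xs.length).map (fun j => 1 + transUpTo xs j)) := by
  induction xs using List.reverseRecOn with
  | nil => rfl
  | append_singleton l c ih =>
    rw [List.foldl_append, ih]
    simp only [List.foldl_cons, List.foldl_nil, cntConAltStep]
    have hlen : (l ++ [c]).length = l.length + 1 := by simp
    by_cases h0 : l.length = 0
    · -- l = []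
      have hl : l = [] := List.length_eq_zero_iff.mp h0
      subst hl
      simp [lastDashBelow, transUpTo, List.getD]
    · -- l nonempty
      have hpos : 0 < l.length := Nat.pos_of_ne_zero h0
      have hruns :
          (if (some (l.getD (l.length - 1) ' ') : Option Char) = some c
             then 1 + transUpTo l (l.length - 1) else 1 + transUpTo l (l.length - 1) + 1)
          = 1 + transUpTo (l ++ [c]) ((l ++ [c]).length - 1) := by
        rw [hlen]
        have hm1 : l.length - 1 + 1 = l.length := by omega
        have hstab := transUpTo_append l c (l.length - 1) (by omega)
        have : transUpTo (l ++ [c]) (l.length + 1 - 1)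
            = transUpTo l (l.length - 1)
              + (if c = l.getD (l.length - 1) ' ' then 0 else 1) := by
          rw [Nat.add_sub_cancel]
          conv_lhs => rw [← hm1]
          simp only [transUpTo]
          rw [hstab, hm1, getD_append_last, getD_append_lt l c (l.length - 1) (by omega)]
        rw [this]
        by_cases hc : c = l.getD (l.length - 1) ' '
        · rw [if_pos (by rw [hc]), if_pos hc]; ring
        · rw [if_neg (by intro h; exact hc (Option.some.inj h).symm), if_neg hc]; ring
      rw [dif_neg h0]
      simp only [if_neg h0]
      refine Prod.ext ?_ (Prod.ext ?_ ?_)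
      · simpa using hruns
      · simp only [hlen]
        rw [dif_neg (by omega)]
        rw [show l.length + 1 - 1 = l.length from rfl, getD_append_last]
      · -- last_at_dash component
        simp only [hlen]
        have hld : lastDashBelow (l ++ [c]) (l.length + 1)
            = if c = '-' then some l.length else lastDashBelow l l.length := by
          simp only [lastDashBelow]
          rw [getD_append_last, lastDashBelow_append l c l.length (le_refl _)]
        rw [hld]
        by_cases hc : c = '-'
        · rw [if_pos hc, if_pos hc]
          simp only [Option.map_some]
          congr 1
          simpa using hruns
        · rw [if_neg hc, if_neg hc]
          cases hldl : lastDashBelow l l.length with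
          | none => simp
          | some j =>
            have hj : j < l.length := lastDashBelow_lt l l.length j hldl
            simp [transUpTo_append l c j hj]

theorem cntCon_alt_eq_specFn (x : String) : cntCon_alt x = cntConSpecFn x.toList := by
  unfold cntCon_alt cntConSpecFn
  rw [foldl_step_inv]
  set xs := x.toList with hxs
  cases hld : lastDashBelow xs xs.length with
  | some j => simp
  | none =>
    simp only [Option.map_none]
    by_cases h0 : xs.length = 0
    · simp [h0, transUpTo]
    · have := transUpTo_nonneg xs (xs.length - 1)
      rw [if_neg h0]
      split <;> omega

-- ===== VERDICT (by name: the statement is the Claim_ definition above) =====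
theorem cntCon_spec : Claim_equal_cntCon := by
  intro x _
  unfold Spec_cntCon
  rw [cntCon_eq_specFn, cntCon_alt_eq_specFn]
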